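-- pv_equiv track=rewrite | github.com/Ananta580/CV-SCREENING | OntologyMapping.py | list_intersection
-- ===== SOURCE A (Python) =====
-- def list_intersection(l1,l2):
--     ul1=[x.upper() for x in l1]
--     ul2=[x.upper() for x in l2]
--
--     s=0
--
--     for i in ul1:
--         for j in ul2:
--             if len(i)>2:
--                 if i in j:
--                     s+=1
--             else:
--                 if i==j:
--                     s+=1
--
--     return s
-- ===== SOURCE B (Python) =====
-- def list_intersection(l1, l2):
--     # Counters instead of pairwise scanning: short (<=2 char) patterns are
--     # matched by one hash lookup per text, long patterns by enumerating each
--     # text's distinct substrings of length >= 3 and summing their counts.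
--     short = {}
--     longs = {}
--     for x in l1:
--         u = x.upper()
--         if len(u) > 2:
--             longs[u] = longs.get(u, 0) + 1
--         else:
--             short[u] = short.get(u, 0) + 1
--     s = 0
--     for y in l2:
--         j = y.upper()
--         s += short.get(j, 0)
--         n = len(j)
--         subs = {j[a:b] for a in range(n) for b in range(a + 3, n + 1)}
--         for t in subs:
--             s += longs.get(t, 0)
--     return s
-- ===== Notes on version B (the rewrite author's own statement) =====
-- stated objective: faster
-- what changed: A scans every (pattern,text) pair; B builds two counters over l1 (short and long uppercased patterns) in one pass, then for each text adds one hash lookup for equality matches and enumerates the text's distinct substrings of length >= 3, summing their counts - the inner scan over the pattern list disappears, so the per-text cost is independent of the number of patterns.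
import Mathlib
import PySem

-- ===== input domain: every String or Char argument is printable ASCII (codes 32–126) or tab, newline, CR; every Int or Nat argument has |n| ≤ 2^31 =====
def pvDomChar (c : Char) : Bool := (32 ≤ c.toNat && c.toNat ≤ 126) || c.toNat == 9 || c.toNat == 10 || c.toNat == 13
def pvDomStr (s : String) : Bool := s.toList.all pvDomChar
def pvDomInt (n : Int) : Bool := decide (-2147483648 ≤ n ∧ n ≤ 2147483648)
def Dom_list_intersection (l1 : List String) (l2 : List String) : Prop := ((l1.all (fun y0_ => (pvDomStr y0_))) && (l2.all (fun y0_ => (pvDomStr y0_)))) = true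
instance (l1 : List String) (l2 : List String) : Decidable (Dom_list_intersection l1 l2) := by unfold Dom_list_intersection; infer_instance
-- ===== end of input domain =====

-- B replaces A's pairwise scan by two counters over l1 and, per text, a hash lookup plus an
-- enumeration of the text's distinct substrings of length >= 3 (alternative algorithm; same result proved equal).


-- ===== PORT A =====
def list_intersection (l1 : List String) (l2 : List String) : Int :=
  let ul1 := l1.map (fun x => PySem.Str.upper x)
  let ul2 := l2.map (fun x => PySem.Str.upper x)
  ul1.foldl (fun s i =>
    ul2.foldl (fun s j =>
      if 2 < PySem.Str.len i then
        (if PySem.Str.isIn i j then s + 1 else s)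
      else
        (if i == j then s + 1 else s)) s) 0

-- ===== PORT B =====
-- helper: B's substring set-comprehension for one text j ({j[a:b] for a in range(n) for b in range(a+3, n+1)})
def pvSubs (j : String) : List String :=
  (PySem.List.pyRange 0 (PySem.Str.len j) 1).flatMap (fun a =>
    (PySem.List.pyRange (a + 3) ((PySem.Str.len j) + 1) 1).map (fun b =>
      PySem.Str.slice j (some a) (some b)))

def list_intersection_alt (l1 : List String) (l2 : List String) : Int :=
  let p := l1.foldl (fun (st : PySem.Dict String Int × PySem.Dict String Int) x =>
      let u := PySem.Str.upper x
      if 2 < PySem.Str.len u then (st.1, st.2.insert u (st.2.getD u 0 + 1))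
      else (st.1.insert u (st.1.getD u 0 + 1), st.2))
    ((PySem.Dict.empty : PySem.Dict String Int), (PySem.Dict.empty : PySem.Dict String Int))
  l2.foldl (fun s y =>
    let j := PySem.Str.upper y
    let subs : PySem.Set String := PySem.Set.ofList (pvSubs j)
    subs.foldl (fun s t => s + p.2.getD t 0) (s + p.1.getD j 0)) 0

-- ===== PRECONDITION & SPEC =====
def Spec_list_intersection (l1 : List String) (l2 : List String) (out : Int) : Prop := out = list_intersection_alt l1 l2
instance (l1 : List String) (l2 : List String) (out : Int) : Decidable (Spec_list_intersection l1 l2 out) := by unfold Spec_list_intersection; infer_instance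

-- ===== CLAIM (what is proved, stated in full; the proofs are below) =====
def Claim_equal_list_intersection : Prop := ∀ (l1 : List String) (l2 : List String), Dom_list_intersection l1 l2 → Spec_list_intersection l1 l2 (list_intersection l1 l2)

-- ===== LEMMAS AND PROOFS =====

-- the per-pair contribution both programs count
def pvHit (i j : String) : Bool :=
  if 2 < PySem.Str.len i then PySem.Str.isIn i j else i == j

-- exchanging the two summations
theorem pv_exch (l m : List String) (P : String → String → Bool) :
    (l.map (fun i => ((m.countP (P i) : Nat) : Int))).sum
      = (m.map (fun j => ((l.countP (fun i => P i j) : Nat) : Int))).sum := by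
  induction l with
  | nil => simp
  | cons i l ih =>
    simp only [List.map_cons, List.sum_cons, List.countP_cons, ih]
    push_cast
    rw [PySem.List.sum_map_add_int, PySem.List.sum_map_ite_one_zero]
    ring

-- counting a branching predicate splits along the partition of l by the branch condition
theorem pv_split (l : List String) (j : String) :
    l.countP (fun i => pvHit i j)
      = (l.filter (fun i => !decide (2 < PySem.Str.len i))).count j
        + (l.filter (fun i => decide (2 < PySem.Str.len i))).countP (fun i => PySem.Str.isIn i j) := by
  induction l with
  | nil => simp
  | cons i l ih =>
    by_cases h : 2 < i.length <;>
      simp [pvHit, List.countP_cons, List.count_cons, h] at ih ⊢ <;> omega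

-- A's value as the double sum
theorem pv_A (l1 l2 : List String) :
    list_intersection l1 l2
      = ((l1.map (fun x => PySem.Str.upper x)).map (fun i =>
          (((l2.map (fun x => PySem.Str.upper x)).countP (fun j => pvHit i j) : Nat) : Int))).sum := by
  unfold list_intersection
  rw [PySem.List.foldl_congr_mem (g := fun s i =>
      s + (((l2.map (fun x => PySem.Str.upper x)).countP (fun j => pvHit i j) : Nat) : Int))]
  · rw [PySem.List.foldl_add]; simp
  · intro acc i _
    by_cases h : (2:Int) < PySem.Str.len i
    · have hb : ∀ j ∈ l2.map (fun x => PySem.Str.upper x),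
          pvHit i j = true ↔ PySem.Str.isIn i j = true := by
        intro j _; simp only [pvHit, if_pos h]
      rw [List.countP_congr hb]
      simp only [if_pos h]
      rw [PySem.List.foldl_if_add_one]
    · have hb : ∀ j ∈ l2.map (fun x => PySem.Str.upper x),
          pvHit i j = true ↔ (i == j) = true := by
        intro j _; simp only [pvHit, if_neg h]
      rw [List.countP_congr hb]
      simp only [if_neg h]
      rw [PySem.List.foldl_if_add_one]

-- the partition fold of B, split into the two counters
theorem pv_B_fold (l1 : List String) :
    l1.foldl (fun (st : PySem.Dict String Int × PySem.Dict String Int) x =>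
        let u := PySem.Str.upper x
        if 2 < PySem.Str.len u then (st.1, st.2.insert u (st.2.getD u 0 + 1))
        else (st.1.insert u (st.1.getD u 0 + 1), st.2))
      ((PySem.Dict.empty : PySem.Dict String Int), (PySem.Dict.empty : PySem.Dict String Int))
      = (((l1.map (fun x => PySem.Str.upper x)).filter
            (fun u => !decide (2 < PySem.Str.len u))).foldl
            (fun d u => d.insert u (d.getD u 0 + 1)) (PySem.Dict.empty : PySem.Dict String Int),
         ((l1.map (fun x => PySem.Str.upper x)).filter
            (fun u => decide (2 < PySem.Str.len u))).foldl
            (fun d u => d.insert u (d.getD u 0 + 1)) (PySem.Dict.empty : PySem.Dict String Int)) := by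
  induction l1 using List.reverseRecOn with
  | nil => simp
  | append_singleton l1 x ih =>
    by_cases h : 2 < (PySem.Chars.upper x.toList).length
    all_goals
      have h' : (2 < (PySem.Str.upper x).length) = (2 < (PySem.Chars.upper x.toList).length) := by
        have hl : (PySem.Str.upper x).length = (PySem.Chars.upper x.toList).length := by
          simp [PySem.Str.upper]
        rw [hl]
      simp [List.foldl_append, List.filter_append, h, h'] at ih ⊢
      simp [ih]

-- membership in B's substring enumeration is exactly infix of length ≥ 3
theorem pv_mem_subs (j t : String) :
    t ∈ pvSubs j ↔ (t.toList <:+: j.toList ∧ 2 < t.toList.length) := by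
  unfold pvSubs
  simp only [List.mem_flatMap, List.mem_map, PySem.List.mem_pyRange_one]
  constructor
  · rintro ⟨a, ⟨ha0, han⟩, b, ⟨hab, hbn⟩, rfl⟩
    have ha0' : 0 ≤ a := ha0
    have hb0 : 0 ≤ b := by omega
    have htl : (PySem.Str.slice j (some a) (some b)).toList
        = (j.toList.drop a.toNat).take (b.toNat - a.toNat) := by
      rw [PySem.Str.toList_slice, PySem.Chars.slice_eq_listSlice,
        PySem.List.slice_toNat _ ha0' hb0]
    refine ⟨?_, ?_⟩
    · rw [htl]
      exact ((j.toList.drop a.toNat).take_prefix _).isInfix.trans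
        (j.toList.drop_suffix a.toNat).isInfix
    · rw [htl]
      simp only [List.length_take, List.length_drop]
      have hjlen : (PySem.Str.len j) = (j.toList.length : Int) := by simp
      omega
  · rintro ⟨⟨s, u, hsu⟩, hlen⟩
    refine ⟨(s.length : Int), ?_, (s.length : Int) + (t.toList.length : Int), ?_, ?_⟩
    · have hL : s.length + t.toList.length + u.length = j.toList.length := by
        rw [← hsu]; simp; omega
      have hjlen : (PySem.Str.len j) = (j.toList.length : Int) := by simp
      omega
    · have hL : s.length + t.toList.length + u.length = j.toList.length := by
        rw [← hsu]; simp; omega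
      have hjlen : (PySem.Str.len j) = (j.toList.length : Int) := by simp
      omega
    · apply String.toList_inj.mp
      rw [PySem.Str.toList_slice, PySem.Chars.slice_eq_listSlice]
      rw [show (s.length : Int) + (t.toList.length : Int)
            = ((s.length + t.toList.length : Nat) : Int) by push_cast; ring]
      rw [PySem.List.slice_natCast]
      rw [← hsu]
      simp

-- summing counts over a duplicate-free list of values is counting membership
theorem pv_count_sum (L : List String) (S : List String) (hS : S.Nodup) :
    (S.map (fun t => ((L.count t : Nat) : Int))).sum
      = ((L.countP (fun i => decide (i ∈ S)) : Nat) : Int) := by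
  induction L with
  | nil => simp
  | cons i L ih =>
    simp only [List.count_cons, List.countP_cons]
    push_cast
    rw [PySem.List.sum_map_add_int, ih]
    rw [PySem.List.sum_map_ite_one_zero]
    have h3 : S.countP (fun t => i == t) = S.count i := by
      rw [List.count]
      apply List.countP_congr
      intro t _
      simp only [beq_iff_eq]
      exact eq_comm
    rw [h3]
    by_cases hm : i ∈ S
    · rw [List.count_eq_one_of_mem hS hm]; simp [hm]
    · rw [List.count_eq_zero_of_not_mem hm]; simp [hm]

-- B's value as the swapped sum
theorem pv_B (l1 l2 : List String) :
    list_intersection_alt l1 l2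
      = ((l2.map (fun x => PySem.Str.upper x)).map (fun j =>
          ((((l1.map (fun x => PySem.Str.upper x)).filter
               (fun u => !decide (2 < PySem.Str.len u))).count j : Nat) : Int)
          + ((((l1.map (fun x => PySem.Str.upper x)).filter
               (fun u => decide (2 < PySem.Str.len u))).countP
               (fun i => PySem.Str.isIn i j) : Nat) : Int))).sum := by
  unfold list_intersection_alt
  rw [pv_B_fold]
  set Shorts := (l1.map (fun x => PySem.Str.upper x)).filter
      (fun u => !decide (2 < PySem.Str.len u)) with hSh
  set Longs := (l1.map (fun x => PySem.Str.upper x)).filter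
      (fun u => decide (2 < PySem.Str.len u)) with hLo
  rw [PySem.List.foldl_congr_mem (g := fun s y =>
      s + (((Shorts.count (PySem.Str.upper y) : Nat) : Int)
        + ((Longs.countP (fun i => PySem.Str.isIn i (PySem.Str.upper y)) : Nat) : Int)))]
  · rw [PySem.List.foldl_add]; simp [List.map_map, Function.comp_def]
  · intro acc y _
    simp only
    rw [PySem.List.foldl_add]
    rw [PySem.Dict.getD_foldl_insert_add_one]
    have hmap : (PySem.Set.ofList (pvSubs (PySem.Str.upper y)) : List String).map
          (fun t => (Longs.foldl
              (fun d u => d.insert u (d.getD u 0 + 1)) (PySem.Dict.empty : PySem.Dict String Int)).getD t 0)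
        = (PySem.Set.ofList (pvSubs (PySem.Str.upper y)) : List String).map
          (fun t => ((Longs.count t : Nat) : Int)) := by
      apply List.map_congr_left
      intro t _
      rw [PySem.Dict.getD_foldl_insert_add_one]
      simp [PySem.Dict.getD]
    have hcong : Longs.countP (fun i => decide (i ∈ (PySem.Set.ofList (pvSubs (PySem.Str.upper y)) : List String)))
        = Longs.countP (fun i => PySem.Str.isIn i (PySem.Str.upper y)) := by
      apply List.countP_congr
      intro i hi
      have hilen : 2 < PySem.Str.len i := by
        rw [hLo] at hi
        have := List.of_mem_filter hi
        simpa using this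
      have hilen' : 2 < i.toList.length := by
        have : (PySem.Str.len i) = (i.toList.length : Int) := by simp
        omega
      simp only [decide_eq_true_eq, PySem.Set.mem_ofList, pv_mem_subs]
      rw [show PySem.Str.isIn i (PySem.Str.upper y)
            = PySem.Chars.isIn i.toList (PySem.Str.upper y).toList by simp]
      rw [PySem.Chars.isIn_iff_infix]
      constructor
      · rintro ⟨h, _⟩; exact h
      · intro h; exact ⟨h, hilen'⟩
    rw [hmap, pv_count_sum Longs _ (PySem.Set.nodup_ofList _), hcong]
    simp [PySem.Dict.getD]
    ring

-- ===== VERDICT (by name: the statement is the Claim_ definition above) =====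
theorem list_intersection_spec : Claim_equal_list_intersection := by
  intro l1 l2 _
  unfold Spec_list_intersection
  rw [pv_A, pv_B, pv_exch]
  apply congrArg
  apply List.map_congr_left
  intro j _
  rw [pv_split]
  push_cast
  ring
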